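-- pv_equiv track=rewrite | github.com/dpierf/autoconhecimento | app.py | numerologia
-- ===== SOURCE A (Python) =====
-- letras = {
--     **dict.fromkeys(list("AJS"), 1), **dict.fromkeys(list("BKT"), 2), **dict.fromkeys(list("CLU"), 3),
--     **dict.fromkeys(list("DMV"), 4), **dict.fromkeys(list("ENW"), 5), **dict.fromkeys(list("FOX"), 6),
--     **dict.fromkeys(list("GPY"), 7), **dict.fromkeys(list("HQZ"), 8), **dict.fromkeys(list("IR"),  9),
-- }
--
-- VOGAIS = set("AEIOU")
--
-- def _reduzir(n, mestres=frozenset({11, 22})):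
--     while n > 9 and n not in mestres:
--         n = sum(int(d) for d in str(n))
--     return n
--
-- def numerologia(nome, sobrenome, dia, mes, ano):
--     nc = f"{nome} {sobrenome}".upper(); nu = nome.upper()
--     life        = _reduzir(sum(int(d) for d in f"{dia:02d}{mes:02d}{ano}"))
--     active      = _reduzir(sum(letras.get(c, 0) for c in nu if c in letras))
--     heart       = _reduzir(sum(letras.get(c, 0) for c in nc if c in VOGAIS))
--     personality = _reduzir(sum(letras.get(c, 0) for c in nc if c.isalpha() and c not in VOGAIS and c in letras))
--     karma       = sorted(set(range(1, 10)) - {letras[c] for c in nc if c in letras})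
--     return life, active, heart, personality, karma
-- ===== SOURCE B (Python) =====
-- ALFABETO = "ABCDEFGHIJKLMNOPQRSTUVWXYZ"
-- VOG = "AEIOU"
--
-- def _conta(s, c):
--     k = 0
--     for x in s:
--         if x == c:
--             k += 1
--     return k
--
-- def _dsum(s):
--     return sum(int(d) for d in s)
--
-- def _reduzir(n):
--     return n if n <= 9 or n == 11 or n == 22 else _reduzir(_dsum(str(n)))
--
-- def numerologia(nome, sobrenome, dia, mes, ano):
--     # histogram over the fixed alphabet: count each letter's occurrences once,
--     # instead of scanning the name character by character with a lookup table
--     nc = (nome + " " + sobrenome).upper()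
--     nu = nome.upper()
--     heart = personality = active = 0
--     for i, c in enumerate(ALFABETO):
--         v = i % 9 + 1
--         k = _conta(nc, c)
--         if c in VOG:
--             heart += v * k
--         else:
--             personality += v * k
--         active += v * _conta(nu, c)
--     karma = [v for v in range(1, 10)
--              if all(_conta(nc, c) == 0 for c in ALFABETO[v - 1::9])]
--     life = _reduzir(_dsum(str(dia)) + _dsum(str(mes)) + _dsum(str(ano)))
--     return life, _reduzir(active), _reduzir(heart), _reduzir(personality), karma
-- ===== Notes on version B (the rewrite author's own statement) =====
-- stated objective: alternative
-- what changed: B inverts the traversal: instead of scanning the name once per category with a 26-entry lookup dict and a seen-value set, it iterates over the fixed alphabet, counts each letter's occurrences (a histogram), derives the letter value from its alphabet position (i%9+1), tests karma absence directly on the three letters of each value class via a stride-9 slice, computes life from per-component digit sums, and uses a recursive _reduzir.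
import Mathlib
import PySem

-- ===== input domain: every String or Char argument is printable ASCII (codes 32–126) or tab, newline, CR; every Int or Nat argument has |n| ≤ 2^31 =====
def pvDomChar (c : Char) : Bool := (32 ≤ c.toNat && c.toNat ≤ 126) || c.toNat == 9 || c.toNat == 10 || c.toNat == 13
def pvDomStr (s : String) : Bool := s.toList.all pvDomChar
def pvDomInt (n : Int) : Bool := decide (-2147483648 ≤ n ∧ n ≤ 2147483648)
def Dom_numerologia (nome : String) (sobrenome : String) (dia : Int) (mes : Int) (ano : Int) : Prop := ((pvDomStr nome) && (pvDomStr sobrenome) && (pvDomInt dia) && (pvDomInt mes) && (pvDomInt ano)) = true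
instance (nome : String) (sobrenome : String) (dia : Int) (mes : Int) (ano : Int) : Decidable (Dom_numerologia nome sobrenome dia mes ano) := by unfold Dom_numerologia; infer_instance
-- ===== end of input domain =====

-- B inverts the traversal: it iterates over the fixed alphabet counting each letter's occurrences
-- (a histogram), derives letter values from alphabet position, tests karma absence per value class
-- via a stride-9 slice, sums life's digits per component, and reduces recursively (objective: alternative).

-- ===== PORT A =====

-- sum(int(d) for d in s); int(d) raises on a non-digit char — unreachable on the admitted inputs (Pre_)
def digitSum (s : String) : Int :=
  s.toList.foldl (fun a d => a + ((PySem.Int.ofChars? [d]).getD 0)) 0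

-- _reduzir's while loop with a fuel guard only: 64 iterations far exceed any chain the loop performs
def reduzir : Nat → Int → Int
  | 0, n => n
  | fuel+1, n => if n > 9 ∧ ¬(n = 11 ∨ n = 22) then reduzir fuel (digitSum (PySem.Int.toStr n)) else n

-- f"{n:02d}": zero-pad to width 2; exact for 0 ≤ n (Pre_ guarantees it)
def fmt02 (n : Int) : String :=
  if PySem.Str.len (PySem.Int.toStr n) < 2 then "0" ++ PySem.Int.toStr n else PySem.Int.toStr n

-- the module-level dict `letras`, in its insertion order
def letras : PySem.Dict Char Int := PySem.Dict.ofList [('A',1),('J',1),('S',1),('B',2),('K',2),('T',2),('C',3),('L',3),('U',3),('D',4),('M',4),('V',4),('E',5),('N',5),('W',5),('F',6),('O',6),('X',6),('G',7),('P',7),('Y',7),('H',8),('Q',8),('Z',8),('I',9),('R',9)]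

def VOGAIS : PySem.Set Char := PySem.Set.ofList ['A','E','I','O','U']

def numerologia (nome : String) (sobrenome : String) (dia : Int) (mes : Int) (ano : Int) : Int × Int × Int × Int × List Int :=
  let nc := (PySem.Str.upper (nome ++ " " ++ sobrenome)).toList
  let nu := (PySem.Str.upper nome).toList
  let life := reduzir 64 (digitSum (fmt02 dia ++ fmt02 mes ++ PySem.Int.toStr ano))
  let active := reduzir 64 (nu.foldl (fun a c => if letras.contains c then a + letras.getD c 0 else a) 0)
  let heart := reduzir 64 (nc.foldl (fun a c => if PySem.Set.contains VOGAIS c then a + letras.getD c 0 else a) 0)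
  let personality := reduzir 64 (nc.foldl (fun a c => if PySem.Chars.isalpha c && !(PySem.Set.contains VOGAIS c) && letras.contains c then a + letras.getD c 0 else a) 0)
  -- letras[c] is guarded by `c in letras`, so it equals letras.get(c, 0) here
  let seen : PySem.Set Int := nc.foldl (fun s c => if letras.contains c then PySem.Set.add s (letras.getD c 0) else s) PySem.Set.empty
  let karma := PySem.List.sorted (PySem.Set.diff (PySem.Set.ofList (PySem.List.pyRange 1 10 1)) seen) (fun x => x) false
  (life, active, heart, personality, karma)

-- ===== PORT B =====

def ALFABETO : List Char := ['A','B','C','D','E','F','G','H','I','J','K','L','M','N','O','P','Q','R','S','T','U','V','W','X','Y','Z']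

-- _conta(s, c): explicit counting loop
def conta (s : List Char) (c : Char) : Int := s.foldl (fun k x => if x == c then k + 1 else k) 0

-- _reduzir, recursive form; fuel guard only (64 iterations far exceed any reduction chain)
def reduzirB : Nat → Int → Int
  | 0, n => n
  | fuel+1, n => if n ≤ 9 ∨ n = 11 ∨ n = 22 then n else reduzirB fuel (digitSum (PySem.Int.toStr n))

def numerologia_alt (nome : String) (sobrenome : String) (dia : Int) (mes : Int) (ano : Int) : Int × Int × Int × Int × List Int :=
  let nc := (PySem.Str.upper (nome ++ " " ++ sobrenome)).toList
  let nu := (PySem.Str.upper nome).toList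
  -- for i, c in enumerate(ALFABETO): one histogram step per alphabet letter
  let st := (PySem.List.enumerate ALFABETO 0).foldl (fun (st : Int × Int × Int) ic =>
      let v : Int := PySem.Int.mod ic.1 9 + 1
      let k := conta nc ic.2
      -- `c in "AEIOU"` on a single character is membership
      let hp := if ['A','E','I','O','U'].contains ic.2 then (st.1 + v * k, st.2.1) else (st.1, st.2.1 + v * k)
      (hp.1, hp.2, st.2.2 + v * conta nu ic.2)) (0, 0, 0)
  let karma := (PySem.List.pyRange 1 10 1).filter (fun v =>
      ((PySem.List.slice? ALFABETO (some (v - 1)) none 9).getD []).all (fun c => conta nc c == 0))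
  let life := reduzirB 64 (digitSum (PySem.Int.toStr dia) + digitSum (PySem.Int.toStr mes) + digitSum (PySem.Int.toStr ano))
  (life, reduzirB 64 st.2.2, reduzirB 64 st.1, reduzirB 64 st.2.1, karma)

-- ===== PRECONDITION & SPEC =====
-- Pre_ excludes exactly the inputs where A raises ValueError: a negative dia, mes or ano puts a '-'
-- into the digit string and int('-') fails (B raises there too).
def Pre_numerologia (nome : String) (sobrenome : String) (dia : Int) (mes : Int) (ano : Int) : Prop :=
  0 ≤ dia ∧ 0 ≤ mes ∧ 0 ≤ ano
instance (nome : String) (sobrenome : String) (dia : Int) (mes : Int) (ano : Int) : Decidable (Pre_numerologia nome sobrenome dia mes ano) := by unfold Pre_numerologia; infer_instance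

def pvWitness_numerologia : String × String × Int × Int × Int := ("Ana", "Silva", 17, 4, 1990)

def Spec_numerologia (nome : String) (sobrenome : String) (dia : Int) (mes : Int) (ano : Int) (out : Int × Int × Int × Int × List Int) : Prop := out = numerologia_alt nome sobrenome dia mes ano
instance (nome : String) (sobrenome : String) (dia : Int) (mes : Int) (ano : Int) (out : Int × Int × Int × Int × List Int) : Decidable (Spec_numerologia nome sobrenome dia mes ano out) := by unfold Spec_numerologia; infer_instance

-- ===== CLAIM (what is proved, stated in full; the proofs are below) =====
def Claim_equal_numerologia : Prop := ∀ (nome : String) (sobrenome : String) (dia : Int) (mes : Int) (ano : Int), Dom_numerologia nome sobrenome dia mes ano → Pre_numerologia nome sobrenome dia mes ano → Spec_numerologia nome sobrenome dia mes ano (numerologia nome sobrenome dia mes ano)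

-- ===== LEMMAS AND PROOFS =====

-- the digit value of one character, as digitSum reads it
def dval (d : Char) : Int := (PySem.Int.ofChars? [d]).getD 0

lemma digitSum_eq_sum (s : String) : digitSum s = (s.toList.map dval).sum := by
  unfold digitSum
  rw [PySem.List.foldl_add]
  simp only [zero_add]
  rfl

-- the two reduzir forms are the same loop
lemma reduzirB_eq (fuel : Nat) (n : Int) : reduzirB fuel n = reduzir fuel n := by
  induction fuel generalizing n with
  | zero => rfl
  | succ f ih =>
    simp only [reduzirB, reduzir]
    by_cases h : n > 9 ∧ ¬(n = 11 ∨ n = 22)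
    · rw [if_neg (by omega), if_pos h, ih]
    · rw [if_pos (by omega), if_neg h]

lemma digitSum_fmt02 (n : Int) : digitSum (fmt02 n) = digitSum (PySem.Int.toStr n) := by
  unfold fmt02
  split
  · rw [digitSum_eq_sum, digitSum_eq_sum]
    have h0 : ("0" ++ PySem.Int.toStr n).toList = '0' :: (PySem.Int.toStr n).toList := by
      simp [String.toList_append]
    rw [h0]
    have hd : dval '0' = 0 := by decide
    simp [hd]
  · rfl

lemma digitSum_append (s t : String) : digitSum (s ++ t) = digitSum s + digitSum t := by
  rw [digitSum_eq_sum, digitSum_eq_sum, digitSum_eq_sum, String.toList_append, List.map_append, List.sum_append]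

-- life components agree
lemma life_eq (dia mes ano : Int) :
    reduzir 64 (digitSum (fmt02 dia ++ fmt02 mes ++ PySem.Int.toStr ano))
      = reduzirB 64 (digitSum (PySem.Int.toStr dia) + digitSum (PySem.Int.toStr mes) + digitSum (PySem.Int.toStr ano)) := by
  rw [reduzirB_eq, digitSum_append, digitSum_append, digitSum_fmt02, digitSum_fmt02]

lemma letras_items : letras.items = [('A',1),('J',1),('S',1),('B',2),('K',2),('T',2),('C',3),('L',3),('U',3),('D',4),('M',4),('V',4),('E',5),('N',5),('W',5),('F',6),('O',6),('X',6),('G',7),('P',7),('Y',7),('H',8),('Q',8),('Z',8),('I',9),('R',9)] := by decide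

-- closed form of the table (proof-side abbreviation)
def bval (c : Char) : Int := if 65 ≤ c.toNat ∧ c.toNat ≤ 90 then ((c.toNat : Int) - 65) % 9 + 1 else 0

lemma letras_get?_out (c : Char) (h : ¬(65 ≤ c.toNat ∧ c.toNat ≤ 90)) : letras.get? c = none := by
  have hfind : List.find? (fun p => p.1 == c) letras.items = none := by
    rw [List.find?_eq_none]
    intro p hp
    have hb : 65 ≤ p.1.toNat ∧ p.1.toNat ≤ 90 := by
      rw [letras_items] at hp; fin_cases hp <;> decide
    intro he
    have hec : p.1 = c := eq_of_beq he
    rw [hec] at hb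
    exact h hb
  simp [PySem.Dict.get?, hfind]

lemma letras_getD_eq (c : Char) : letras.getD c 0 = bval c := by
  by_cases h : 65 ≤ c.toNat ∧ c.toNat ≤ 90
  · obtain ⟨h1, h2⟩ := h
    interval_cases h : c.toNat <;>
      (have hc : c = Char.ofNat c.toNat := (Char.ofNat_toNat c).symm; rw [h] at hc; subst hc; decide)
  · rw [PySem.Dict.getD_eq_get?_getD, letras_get?_out c h]
    simp [bval, h]

lemma letras_contains_eq (c : Char) : letras.contains c = decide (65 ≤ c.toNat ∧ c.toNat ≤ 90) := by
  by_cases h : 65 ≤ c.toNat ∧ c.toNat ≤ 90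
  · obtain ⟨h1, h2⟩ := h
    interval_cases h : c.toNat <;>
      (have hc : c = Char.ofNat c.toNat := (Char.ofNat_toNat c).symm; rw [h] at hc; subst hc; decide)
  · rw [PySem.Dict.contains_eq_isSome_get?, letras_get?_out c h]
    simp [h]

lemma mem_ALFA_iff (c : Char) : c ∈ ALFABETO ↔ (65 ≤ c.toNat ∧ c.toNat ≤ 90) := by
  constructor
  · intro h; fin_cases h <;> decide
  · rintro ⟨h1, h2⟩
    interval_cases h : c.toNat <;>
      (have hc : c = Char.ofNat c.toNat := (Char.ofNat_toNat c).symm; rw [h] at hc; subst hc; decide)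

lemma conta_eq (s : List Char) (c : Char) : conta s c = (s.count c : Int) := by
  unfold conta
  rw [PySem.List.foldl_beq_add_one]
  simp

-- Σ over ALFABETO of an indicator at c
lemma sum_ite_mem (L : List Char) (hnd : L.Nodup) (w : Char → Int) (c : Char) :
    (L.map (fun x => if x = c then w x else 0)).sum = if c ∈ L then w c else 0 := by
  induction L with
  | nil => simp
  | cons a t ih =>
    rcases List.nodup_cons.mp hnd with ⟨ha, ht⟩
    by_cases h : a = c
    · subst h
      simp [ha, ih ht]
    · simp [h, ih ht, Ne.symm h]

-- any per-letter weight vanishing off A–Z sums over a string as over the alphabet with counts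
lemma sumw (w : Char → Int) (h0 : ∀ x, ¬(65 ≤ x.toNat ∧ x.toNat ≤ 90) → w x = 0) (l : List Char) :
    (l.map w).sum = (ALFABETO.map (fun x => w x * (l.count x : Int))).sum := by
  induction l with
  | nil => simp
  | cons c t ih =>
    have hsplit : (ALFABETO.map (fun x => w x * (((c :: t).count x : Nat) : Int))).sum
        = (ALFABETO.map (fun x => w x * (t.count x : Int) + (if x = c then w x else 0))).sum := by
      apply congrArg
      apply List.map_congr_left
      intro x hx
      rw [List.count_cons]
      push_cast
      rw [mul_add]
      congr 1
      by_cases h : x = c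
      · simp [h]
      · simp [h, Ne.symm h]
    rw [List.map_cons, List.sum_cons, ih, hsplit, PySem.List.sum_map_add_int,
        sum_ite_mem ALFABETO (by decide) w c]
    by_cases hc : c ∈ ALFABETO
    · rw [if_pos hc]; ring
    · rw [if_neg hc, h0 c (fun h => hc ((mem_ALFA_iff c).mpr h))]; ring

-- the three A-side weights
def wA (c : Char) : Int := if letras.contains c then letras.getD c 0 else 0
def wH (c : Char) : Int := if PySem.Set.contains VOGAIS c then letras.getD c 0 else 0
def wP (c : Char) : Int := if PySem.Chars.isalpha c && !(PySem.Set.contains VOGAIS c) && letras.contains c then letras.getD c 0 else 0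

lemma wA_zero (x : Char) (h : ¬(65 ≤ x.toNat ∧ x.toNat ≤ 90)) : wA x = 0 := by
  unfold wA; rw [letras_contains_eq]; simp [h]

lemma vowel_range (c : Char) (h : PySem.Set.contains VOGAIS c = true) : 65 ≤ c.toNat ∧ c.toNat ≤ 90 := by
  rw [PySem.Set.contains_iff] at h
  have : c ∈ ['A','E','I','O','U'] := h
  fin_cases this <;> decide

lemma wH_zero (x : Char) (h : ¬(65 ≤ x.toNat ∧ x.toNat ≤ 90)) : wH x = 0 := by
  unfold wH
  by_cases hv : PySem.Set.contains VOGAIS x = true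
  · exact absurd (vowel_range x hv) h
  · rw [if_neg hv]

lemma wP_zero (x : Char) (h : ¬(65 ≤ x.toNat ∧ x.toNat ≤ 90)) : wP x = 0 := by
  unfold wP; rw [letras_contains_eq]; simp [h]

lemma foldA_eq (l : List Char) :
    l.foldl (fun a c => if letras.contains c then a + letras.getD c 0 else a) 0
      = (ALFABETO.map (fun x => wA x * (l.count x : Int))).sum := by
  have h1 := PySem.List.foldl_congr_mem l (fun a c => if letras.contains c then a + letras.getD c 0 else a) (fun a c => a + wA c) 0
      (fun acc x _ => by unfold wA; dsimp only; split <;> simp)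
  rw [h1, PySem.List.foldl_add, sumw wA wA_zero l]
  simp

lemma foldH_eq (l : List Char) :
    l.foldl (fun a c => if PySem.Set.contains VOGAIS c then a + letras.getD c 0 else a) 0
      = (ALFABETO.map (fun x => wH x * (l.count x : Int))).sum := by
  have h1 := PySem.List.foldl_congr_mem l (fun a c => if PySem.Set.contains VOGAIS c then a + letras.getD c 0 else a) (fun a c => a + wH c) 0
      (fun acc x _ => by unfold wH; dsimp only; split <;> simp)
  rw [h1, PySem.List.foldl_add, sumw wH wH_zero l]
  simp

lemma foldP_eq (l : List Char) :
    l.foldl (fun a c => if PySem.Chars.isalpha c && !(PySem.Set.contains VOGAIS c) && letras.contains c then a + letras.getD c 0 else a) 0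
      = (ALFABETO.map (fun x => wP x * (l.count x : Int))).sum := by
  have h1 := PySem.List.foldl_congr_mem l (fun a c => if PySem.Chars.isalpha c && !(PySem.Set.contains VOGAIS c) && letras.contains c then a + letras.getD c 0 else a) (fun a c => a + wP c) 0
      (fun acc x _ => by unfold wP; dsimp only; split <;> simp)
  rw [h1, PySem.List.foldl_add, sumw wP wP_zero l]
  simp

lemma termH (nc : List Char) (i : Int) (c : Char)
    (h : (if ['A','E','I','O','U'].contains c then PySem.Int.mod i 9 + 1 else 0) = wH c) :
    (if ['A','E','I','O','U'].contains c then (PySem.Int.mod i 9 + 1) * conta nc c else 0) = wH c * (nc.count c : Int) := by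
  rw [← conta_eq]
  by_cases hb : (['A','E','I','O','U'].contains c) = true
  · rw [if_pos hb] at h ⊢; rw [← h]
  · rw [if_neg hb] at h ⊢; rw [← h]; ring

lemma termP (nc : List Char) (i : Int) (c : Char)
    (h : (if ['A','E','I','O','U'].contains c then 0 else PySem.Int.mod i 9 + 1) = wP c) :
    (if ['A','E','I','O','U'].contains c then 0 else (PySem.Int.mod i 9 + 1) * conta nc c) = wP c * (nc.count c : Int) := by
  rw [← conta_eq]
  by_cases hb : (['A','E','I','O','U'].contains c) = true
  · rw [if_pos hb] at h ⊢; rw [← h]; ring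
  · rw [if_neg hb] at h ⊢; rw [← h]

lemma termA (nu : List Char) (i : Int) (c : Char) (h : PySem.Int.mod i 9 + 1 = wA c) :
    (PySem.Int.mod i 9 + 1) * conta nu c = wA c * (nu.count c : Int) := by rw [← conta_eq, h]

lemma sum_enum_eq (g : Int × Char → Int) (h : Char → Int)
    (hE : ∀ p ∈ PySem.List.enumerate ALFABETO 0, g p = h p.2) :
    ((PySem.List.enumerate ALFABETO 0).map g).sum = (ALFABETO.map h).sum := by
  rw [List.map_congr_left hE]
  rw [show (fun p : Int × Char => h p.2) = h ∘ (fun p : Int × Char => p.2) from rfl]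
  rw [← List.map_map, PySem.List.map_snd_enumerate]

-- B's alphabet loop computes exactly those three sums
lemma stB_eq (nc nu : List Char) :
    (PySem.List.enumerate ALFABETO 0).foldl (fun (st : Int × Int × Int) ic =>
      let v : Int := PySem.Int.mod ic.1 9 + 1
      let k := conta nc ic.2
      let hp := if ['A','E','I','O','U'].contains ic.2 then (st.1 + v * k, st.2.1) else (st.1, st.2.1 + v * k)
      (hp.1, hp.2, st.2.2 + v * conta nu ic.2)) (0, 0, 0)
      = ((ALFABETO.map (fun x => wH x * (nc.count x : Int))).sum,
         (ALFABETO.map (fun x => wP x * (nc.count x : Int))).sum,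
         (ALFABETO.map (fun x => wA x * (nu.count x : Int))).sum) := by
  have hcong := PySem.List.foldl_congr_mem (PySem.List.enumerate ALFABETO 0)
    (fun (st : Int × Int × Int) ic =>
      let v : Int := PySem.Int.mod ic.1 9 + 1
      let k := conta nc ic.2
      let hp := if ['A','E','I','O','U'].contains ic.2 then (st.1 + v * k, st.2.1) else (st.1, st.2.1 + v * k)
      (hp.1, hp.2, st.2.2 + v * conta nu ic.2))
    (fun (st : Int × Int × Int) ic =>
      ((fun (s : Int) (e : Int × Char) => s + (if ['A','E','I','O','U'].contains e.2 then (PySem.Int.mod e.1 9 + 1) * conta nc e.2 else 0)) st.1 ic,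
       (fun (p : Int × Int) (e : Int × Char) =>
         ((fun (s : Int) (e : Int × Char) => s + (if ['A','E','I','O','U'].contains e.2 then 0 else (PySem.Int.mod e.1 9 + 1) * conta nc e.2)) p.1 e,
          (fun (s : Int) (e : Int × Char) => s + (PySem.Int.mod e.1 9 + 1) * conta nu e.2) p.2 e)) st.2 ic))
    ((0 : Int), (0 : Int), (0 : Int))
    (fun acc x _ => by dsimp only; split <;> simp)
  rw [hcong, PySem.List.foldl_prod_mk (f := fun (s : Int) (e : Int × Char) => s + (if ['A','E','I','O','U'].contains e.2 then (PySem.Int.mod e.1 9 + 1) * conta nc e.2 else 0))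
      (g := fun (p : Int × Int) (e : Int × Char) => ((fun (s : Int) (e : Int × Char) => s + (if ['A','E','I','O','U'].contains e.2 then 0 else (PySem.Int.mod e.1 9 + 1) * conta nc e.2)) p.1 e, (fun (s : Int) (e : Int × Char) => s + (PySem.Int.mod e.1 9 + 1) * conta nu e.2) p.2 e)),
      PySem.List.foldl_prod_mk (f := fun (s : Int) (e : Int × Char) => s + (if ['A','E','I','O','U'].contains e.2 then 0 else (PySem.Int.mod e.1 9 + 1) * conta nc e.2)) (g := fun (s : Int) (e : Int × Char) => s + (PySem.Int.mod e.1 9 + 1) * conta nu e.2),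
      PySem.List.foldl_add, PySem.List.foldl_add, PySem.List.foldl_add]
  refine Prod.ext ?_ (Prod.ext ?_ ?_)
  · show 0 + _ = _
    rw [sum_enum_eq _ (fun x => wH x * (nc.count x : Int)) (fun p hp => by
      fin_cases hp <;> (apply termH nc <;> decide))]
    simp
  · show 0 + _ = _
    rw [sum_enum_eq _ (fun x => wP x * (nc.count x : Int)) (fun p hp => by
      fin_cases hp <;> (apply termP nc <;> decide))]
    simp
  · show 0 + _ = _
    rw [sum_enum_eq _ (fun x => wA x * (nu.count x : Int)) (fun p hp => by
      fin_cases hp <;> (apply termA nu <;> decide))]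
    simp
-- karma: both sides are the ascending values 1..9 absent from the full name
def seenOf (nc : List Char) : PySem.Set Int :=
  nc.foldl (fun s c => if letras.contains c then PySem.Set.add s (letras.getD c 0) else s) PySem.Set.empty

lemma mem_seenOf (nc : List Char) (v : Int) :
    v ∈ seenOf nc ↔ ∃ c ∈ nc, (65 ≤ c.toNat ∧ c.toNat ≤ 90) ∧ bval c = v := by
  unfold seenOf
  rw [PySem.List.foldl_if_eq_foldl_filter (p := fun c => letras.contains c)
      (f := fun s c => PySem.Set.add s (letras.getD c 0))]
  rw [PySem.Set.mem_foldl_add]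
  constructor
  · rintro (h | ⟨c, hc, rfl⟩)
    · cases h
    · rcases List.mem_filter.mp hc with ⟨hcnc, hcont⟩
      rw [letras_contains_eq] at hcont
      exact ⟨c, hcnc, of_decide_eq_true hcont, (letras_getD_eq c).symm⟩
  · rintro ⟨c, hcnc, hr, rfl⟩
    refine Or.inr ⟨c, List.mem_filter.mpr ⟨hcnc, ?_⟩, (letras_getD_eq c).symm⟩
    rw [letras_contains_eq]
    exact decide_eq_true hr

lemma classOf_spec (v : Int) (c : Char) :
    ((65 ≤ c.toNat ∧ c.toNat ≤ 90) ∧ bval c = v) ↔ c ∈ ALFABETO.filter (fun x => bval x == v) := by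
  rw [List.mem_filter, mem_ALFA_iff, beq_iff_eq]

lemma karma_term (nc : List Char) (v : Int) :
    (!(PySem.Set.contains (seenOf nc) v)) = (ALFABETO.filter (fun x => bval x == v)).all (fun c => conta nc c == 0) := by
  by_cases h : v ∈ seenOf nc
  · rw [(PySem.Set.contains_iff _ _).mpr h]
    symm
    rw [Bool.not_true, List.all_eq_false]
    obtain ⟨c, hcnc, hcl⟩ := (mem_seenOf nc v).mp h
    refine ⟨c, (classOf_spec v c).mp hcl, ?_⟩
    rw [conta_eq]
    simp [List.count_eq_zero, hcnc]
  · have hc : PySem.Set.contains (seenOf nc) v = false := by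
      rw [Bool.eq_false_iff]
      intro ht
      exact h ((PySem.Set.contains_iff _ _).mp ht)
    rw [hc]
    symm
    rw [Bool.not_false, List.all_eq_true]
    intro c hcL
    rw [conta_eq]
    simp only [beq_iff_eq, Int.natCast_eq_zero, List.count_eq_zero]
    intro hmem
    exact h ((mem_seenOf nc v).mpr ⟨c, hmem, (classOf_spec v c).mpr hcL⟩)

lemma karma_eq (nc : List Char) :
    PySem.List.sorted (PySem.Set.diff (PySem.Set.ofList (PySem.List.pyRange 1 10 1))
        (nc.foldl (fun s c => if letras.contains c then PySem.Set.add s (letras.getD c 0) else s) PySem.Set.empty)) (fun x => x) false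
      = (PySem.List.pyRange 1 10 1).filter (fun v =>
          ((PySem.List.slice? ALFABETO (some (v - 1)) none 9).getD []).all (fun c => conta nc c == 0)) := by
  have hsn : (nc.foldl (fun s c => if letras.contains c then PySem.Set.add s (letras.getD c 0) else s) PySem.Set.empty) = seenOf nc := rfl
  rw [hsn]
  have h19 : PySem.Set.ofList (PySem.List.pyRange 1 10 1) = ([1,2,3,4,5,6,7,8,9] : List Int) := by decide
  have hrg : PySem.List.pyRange 1 10 1 = ([1,2,3,4,5,6,7,8,9] : List Int) := by decide
  rw [h19, hrg]
  have hdiff : PySem.Set.diff ([1,2,3,4,5,6,7,8,9] : List Int) (seenOf nc)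
      = ([1,2,3,4,5,6,7,8,9] : List Int).filter (fun v => !(PySem.Set.contains (seenOf nc) v)) := rfl
  rw [hdiff]
  rw [PySem.List.sorted_eq_of_perm_of_pairwise_lt _ _ _ (List.Perm.refl _)
      (List.Pairwise.sublist List.filter_sublist (by decide : ([1,2,3,4,5,6,7,8,9] : List Int).Pairwise (· < ·)))]
  apply List.filter_congr
  intro v hv
  fin_cases hv
  · rw [karma_term nc 1, show ALFABETO.filter (fun x => bval x == (1:Int)) = ((PySem.List.slice? ALFABETO (some ((1:Int) - 1)) none 9).getD []) from by decide]
  · rw [karma_term nc 2, show ALFABETO.filter (fun x => bval x == (2:Int)) = ((PySem.List.slice? ALFABETO (some ((2:Int) - 1)) none 9).getD []) from by decide]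
  · rw [karma_term nc 3, show ALFABETO.filter (fun x => bval x == (3:Int)) = ((PySem.List.slice? ALFABETO (some ((3:Int) - 1)) none 9).getD []) from by decide]
  · rw [karma_term nc 4, show ALFABETO.filter (fun x => bval x == (4:Int)) = ((PySem.List.slice? ALFABETO (some ((4:Int) - 1)) none 9).getD []) from by decide]
  · rw [karma_term nc 5, show ALFABETO.filter (fun x => bval x == (5:Int)) = ((PySem.List.slice? ALFABETO (some ((5:Int) - 1)) none 9).getD []) from by decide]
  · rw [karma_term nc 6, show ALFABETO.filter (fun x => bval x == (6:Int)) = ((PySem.List.slice? ALFABETO (some ((6:Int) - 1)) none 9).getD []) from by decide]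
  · rw [karma_term nc 7, show ALFABETO.filter (fun x => bval x == (7:Int)) = ((PySem.List.slice? ALFABETO (some ((7:Int) - 1)) none 9).getD []) from by decide]
  · rw [karma_term nc 8, show ALFABETO.filter (fun x => bval x == (8:Int)) = ((PySem.List.slice? ALFABETO (some ((8:Int) - 1)) none 9).getD []) from by decide]
  · rw [karma_term nc 9, show ALFABETO.filter (fun x => bval x == (9:Int)) = ((PySem.List.slice? ALFABETO (some ((9:Int) - 1)) none 9).getD []) from by decide]

-- ===== VERDICT (by name: the statement is the Claim_ definition above) =====
theorem numerologia_spec : Claim_equal_numerologia := by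
  intro nome sobrenome dia mes ano _ _
  show _ = _
  simp only [numerologia, numerologia_alt, stB_eq, karma_eq, life_eq, foldA_eq, foldH_eq, foldP_eq, reduzirB_eq]
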